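-- pv_equiv track=rewrite | github.com/avneesh99/firestore_stream | core/initialization_functions/content_reserve_list.py | GetModifiedCategory
-- ===== SOURCE A (Python) =====
-- def GetModifiedCategory(category: str):
--     # Content and ContentReserve collection will have category a different category
--     # Like 'flutter' will be 'coding' there.
--     # Original category will only remain in postgres db: contentScoreModel
--     categoryMap = {
--         'coding': ['flutter', 'golang', 'python', 'ml', 'nodejs', 'frontend'],
--         'music': ['rock', 'rap'],
--         'india': ['indPolitics', 'indNonPolitics']
--     }
--     for key, value in categoryMap.items():
--         if category in value:
--             return key
--
--     return category
-- ===== SOURCE B (Python) =====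
-- _PAIRS = sorted(
--     (sub, parent)
--     for parent, subs in {
--         'coding': ['flutter', 'golang', 'python', 'ml', 'nodejs', 'frontend'],
--         'music': ['rock', 'rap'],
--         'india': ['indPolitics', 'indNonPolitics'],
--     }.items()
--     for sub in subs
-- )
--
-- def GetModifiedCategory(category: str):
--     # binary search the sorted (sub, parent) pairs for `category`
--     lo, hi = 0, len(_PAIRS)
--     while lo < hi:
--         mid = (lo + hi) // 2
--         if _PAIRS[mid][0] < category:
--             lo = mid + 1
--         else:
--             hi = mid
--     if lo < len(_PAIRS) and _PAIRS[lo][0] == category: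
--         return _PAIRS[lo][1]
--     return category
-- ===== Notes on version B (the rewrite author's own statement) =====
-- stated objective: alternative
-- what changed: Replaced A's per-call loop over parent categories with an inner list-membership scan by a binary search over a single flat (subcategory, parent) pair list sorted once by subcategory, falling back to the input when the found slot's key differs.
import Mathlib
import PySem

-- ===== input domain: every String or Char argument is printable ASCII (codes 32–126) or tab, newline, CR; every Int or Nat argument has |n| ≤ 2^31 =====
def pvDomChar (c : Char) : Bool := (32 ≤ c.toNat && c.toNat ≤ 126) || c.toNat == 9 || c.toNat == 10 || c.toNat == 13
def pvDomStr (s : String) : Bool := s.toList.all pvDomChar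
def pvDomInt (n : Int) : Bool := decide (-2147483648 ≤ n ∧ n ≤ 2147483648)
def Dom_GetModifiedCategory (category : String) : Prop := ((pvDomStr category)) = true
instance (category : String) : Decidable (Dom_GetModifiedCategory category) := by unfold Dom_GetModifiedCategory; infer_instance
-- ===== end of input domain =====

-- B replaces A's per-call scan over each parent's subcategory list by a binary search
-- over one flat (sub, parent) list sorted by subcategory (objective: alternative).

-- ===== PORT A =====
-- the dict literal of A, as an insertion-ordered association list
def pvCategoryMapA : List (String × List String) :=
  [("coding", ["flutter", "golang", "python", "ml", "nodejs", "frontend"]),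
   ("music", ["rock", "rap"]),
   ("india", ["indPolitics", "indNonPolitics"])]

-- the for-loop with early return
def pvLoopA (category : String) : List (String × List String) → String
  | [] => category
  | (key, value) :: rest =>
      if value.contains category then key else pvLoopA category rest

def GetModifiedCategory (category : String) : String :=
  pvLoopA category pvCategoryMapA

-- ===== PORT B =====
-- sorted((sub, parent) for parent, subs in {...}.items() for sub in subs)
-- (subcategories are pairwise distinct, so Python's tuple sort equals the stable sort
--  by first component used here)
def pvPairsB : List (String × String) :=
  PySem.List.sorted (pvCategoryMapA.flatMap (fun pv => pv.2.map (fun s => (s, pv.1))))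
    (fun p => p.1.toList)

-- Python's `<` on strings: lexicographic on code points (exact; hand-ported because
-- Lean's String.< instance is not kernel-reducible)
def pvStrLt (a b : String) : Bool := decide (a.toList < b.toList)

-- the while-loop of Source B's binary search; index access is in range whenever hi ≤ length
-- fuel only makes the recursion structural (kernel-reducible); hi - lo shrinks every
-- iteration, so fuel = pvPairsB.length ≥ initial hi - lo never runs out
def pvBisect (category : String) : Nat → Nat → Nat → Nat
  | 0, lo, _ => lo
  | fuel + 1, lo, hi =>
    if lo < hi then
      let mid := (lo + hi) / 2
      if pvStrLt (pvPairsB.getD mid ("", "")).1 category then pvBisect category fuel (mid + 1) hi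
      else pvBisect category fuel lo mid
    else lo

def GetModifiedCategory_alt (category : String) : String :=
  let lo := pvBisect category pvPairsB.length 0 pvPairsB.length
  if lo < pvPairsB.length ∧ (pvPairsB.getD lo ("", "")).1 = category then
    (pvPairsB.getD lo ("", "")).2
  else category

-- ===== PRECONDITION & SPEC =====
def Spec_GetModifiedCategory (category : String) (out : String) : Prop := out = GetModifiedCategory_alt category
instance (category : String) (out : String) : Decidable (Spec_GetModifiedCategory category out) := by unfold Spec_GetModifiedCategory; infer_instance

-- ===== CLAIM =====
def Claim_equal_GetModifiedCategory : Prop := ∀ (category : String), Dom_GetModifiedCategory category → Spec_GetModifiedCategory category (GetModifiedCategory category)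

-- ===== LEMMAS AND PROOFS =====

theorem pv_pairs_eval : pvPairsB =
    [("flutter", "coding"), ("frontend", "coding"), ("golang", "coding"),
     ("indNonPolitics", "india"), ("indPolitics", "india"), ("ml", "coding"),
     ("nodejs", "coding"), ("python", "coding"), ("rap", "music"), ("rock", "music")] := by
  decide

-- fall-through: if category is none of the ten subcategories, B returns category,
-- because the final key-equality check fails whatever index the search lands on.
theorem pv_alt_notfound (category : String)
    (h1 : category ≠ "flutter") (h2 : category ≠ "golang") (h3 : category ≠ "python")
    (h4 : category ≠ "ml") (h5 : category ≠ "nodejs") (h6 : category ≠ "frontend")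
    (h7 : category ≠ "rock") (h8 : category ≠ "rap")
    (h9 : category ≠ "indPolitics") (h10 : category ≠ "indNonPolitics") :
    GetModifiedCategory_alt category = category := by
  unfold GetModifiedCategory_alt
  generalize pvBisect category pvPairsB.length 0 pvPairsB.length = lo
  rw [pv_pairs_eval]
  rw [if_neg]
  rintro ⟨hlt, heq⟩
  simp only [List.length_cons, List.length_nil] at hlt
  interval_cases lo <;> simp_all

theorem pv_agree (category : String) :
    GetModifiedCategory category = GetModifiedCategory_alt category := by
  by_cases h1 : category = "flutter"; · subst h1; decide
  by_cases h2 : category = "golang"; · subst h2; decide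
  by_cases h3 : category = "python"; · subst h3; decide
  by_cases h4 : category = "ml"; · subst h4; decide
  by_cases h5 : category = "nodejs"; · subst h5; decide
  by_cases h6 : category = "frontend"; · subst h6; decide
  by_cases h7 : category = "rock"; · subst h7; decide
  by_cases h8 : category = "rap"; · subst h8; decide
  by_cases h9 : category = "indPolitics"; · subst h9; decide
  by_cases h10 : category = "indNonPolitics"; · subst h10; decide
  have hA : GetModifiedCategory category = category := by
    show pvLoopA category pvCategoryMapA = category
    simp only [pvCategoryMapA, pvLoopA, List.contains_cons, List.contains_nil]
    simp [h1, h2, h3, h4, h5, h6, h7, h8, h9, h10]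
  rw [hA, pv_alt_notfound category h1 h2 h3 h4 h5 h6 h7 h8 h9 h10]

-- ===== VERDICT =====
theorem GetModifiedCategory_spec : Claim_equal_GetModifiedCategory := by
  intro category _
  exact pv_agree category
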